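-- pv_equiv track=rewrite | github.com/PlanXLab/replx_libs | device/ticle/src/ext/environmental/bme68x/bme68x.py | _encode_gas_wait
-- ===== SOURCE A (Python) =====
-- def _encode_gas_wait(ms: int) -> int:
--     dur = int(ms)
--     if dur >= 0xFC0:  # >=4032ms
--         return 0xFF
--     factor = 0
--     while dur > 0x3F and factor < 3:
--         dur //= 4
--         factor += 1
--     return int((dur & 0x3F) | (factor << 6))
-- ===== SOURCE B (Python) =====
-- def _encode_gas_wait(ms: int) -> int:
--     dur = int(ms)
--     if dur >= 0xFC0:  # >=4032ms
--         return 0xFF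
--     factor = 0 if dur < 0x40 else 1 if dur < 0x100 else 2 if dur < 0x400 else 3
--     dur //= 4 ** factor
--     return (dur & 0x3F) | (factor << 6)
-- ===== Notes on version B (the rewrite author's own statement) =====
-- stated objective: simpler
-- what changed: Replaces the iterative divide-by-4 loop with a closed-form shift factor chosen by magnitude thresholds (dur < 0x40/0x100/0x400), then one division by 4**factor.
import Mathlib
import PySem

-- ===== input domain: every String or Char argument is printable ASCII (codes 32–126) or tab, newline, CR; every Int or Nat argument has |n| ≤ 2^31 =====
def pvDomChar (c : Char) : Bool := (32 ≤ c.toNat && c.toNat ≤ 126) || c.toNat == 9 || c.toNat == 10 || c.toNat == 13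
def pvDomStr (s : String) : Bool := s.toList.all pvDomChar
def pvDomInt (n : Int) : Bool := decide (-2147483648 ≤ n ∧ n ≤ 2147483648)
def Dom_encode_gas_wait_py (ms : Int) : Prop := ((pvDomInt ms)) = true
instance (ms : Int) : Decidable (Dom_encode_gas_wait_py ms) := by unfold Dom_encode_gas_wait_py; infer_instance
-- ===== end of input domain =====

-- B replaces A's divide-by-4 loop with a closed-form factor chosen by magnitude thresholds (simpler; same values everywhere).
-- ===== PORT A =====
-- A's 'while dur > 0x3F and factor < 3' loop: at most 3 iterations (factor goes 0→3), ported with fuel 3.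
def pvLoopA : Nat → Int → Int → Int × Int
  | 0, dur, factor => (dur, factor)
  | n + 1, dur, factor =>
      if dur > 0x3F then pvLoopA n (PySem.Int.floordiv dur 4) (factor + 1)
      else (dur, factor)

def encode_gas_wait_py (ms : Int) : Int :=
  let dur := ms
  if dur ≥ 0xFC0 then 0xFF
  else
    let (dur, factor) := pvLoopA 3 dur 0
    PySem.Int.bor (PySem.Int.band dur 0x3F) (factor <<< (6 : Nat))

-- ===== PORT B =====
def encode_gas_wait_py_alt (ms : Int) : Int :=
  let dur := ms
  if dur ≥ 0xFC0 then 0xFF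
  else
    let factor : Int := if dur < 0x40 then 0 else if dur < 0x100 then 1 else if dur < 0x400 then 2 else 3
    let dur := PySem.Int.floordiv dur (4 ^ factor.toNat)
    PySem.Int.bor (PySem.Int.band dur 0x3F) (factor <<< (6 : Nat))

-- ===== PRECONDITION & SPEC =====
def Spec_encode_gas_wait_py (ms : Int) (out : Int) : Prop := out = encode_gas_wait_py_alt ms
instance (ms : Int) (out : Int) : Decidable (Spec_encode_gas_wait_py ms out) := by unfold Spec_encode_gas_wait_py; infer_instance

-- ===== CLAIM (what is proved, stated in full; the proofs are below) =====
def Claim_equal_encode_gas_wait_py : Prop := ∀ (ms : Int), Dom_encode_gas_wait_py ms → Spec_encode_gas_wait_py ms (encode_gas_wait_py ms)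

-- ===== LEMMAS AND PROOFS =====

-- ===== VERDICT (by name: the statement is the Claim_ definition above) =====
theorem encode_gas_wait_py_spec : Claim_equal_encode_gas_wait_py := by
  intro ms _
  unfold Spec_encode_gas_wait_py encode_gas_wait_py encode_gas_wait_py_alt
  by_cases h0 : ms ≥ 0xFC0
  · simp only [if_pos h0]
  · rw [if_neg h0, if_neg h0]
    simp only []
    by_cases h1 : ms < 0x40
    · rw [if_pos h1]
      simp only [pvLoopA, if_neg (by omega : ¬ ms > 0x3F)]
      norm_num [PySem.Int.floordiv_eq_ediv_of_pos, show (2:Int).toNat = 2 from rfl, show (3:Int).toNat = 3 from rfl, show (1:Int).toNat = 1 from rfl, show (0:Int).toNat = 0 from rfl]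
    · rw [if_neg h1]
      by_cases h2 : ms < 0x100
      · rw [if_pos h2]
        have e1 : PySem.Int.floordiv ms 4 = ms / 4 := PySem.Int.floordiv_eq_ediv_of_pos (by omega)
        simp only [pvLoopA, if_pos (by omega : ms > 0x3F), e1,
          if_neg (by omega : ¬ ms / 4 > 0x3F)]
        norm_num [PySem.Int.floordiv_eq_ediv_of_pos, show (2:Int).toNat = 2 from rfl, show (3:Int).toNat = 3 from rfl, show (1:Int).toNat = 1 from rfl, show (0:Int).toNat = 0 from rfl]
      · rw [if_neg h2]
        have e1 : PySem.Int.floordiv ms 4 = ms / 4 := PySem.Int.floordiv_eq_ediv_of_pos (by omega)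
        have e2 : PySem.Int.floordiv (ms / 4) 4 = ms / 4 / 4 := PySem.Int.floordiv_eq_ediv_of_pos (by omega)
        by_cases h3 : ms < 0x400
        · rw [if_pos h3]
          have c2 : ms / 4 / 4 = ms / 16 := by omega
          simp only [pvLoopA, if_pos (by omega : ms > 0x3F), e1,
            if_pos (by omega : ms / 4 > 0x3F), e2, c2,
            if_neg (by omega : ¬ ms / 16 > 0x3F)]
          norm_num [PySem.Int.floordiv_eq_ediv_of_pos, show (2:Int).toNat = 2 from rfl, show (3:Int).toNat = 3 from rfl, show (1:Int).toNat = 1 from rfl, show (0:Int).toNat = 0 from rfl]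
        · rw [if_neg h3]
          have c2 : ms / 4 / 4 = ms / 16 := by omega
          have e3 : PySem.Int.floordiv (ms / 16) 4 = ms / 16 / 4 := PySem.Int.floordiv_eq_ediv_of_pos (by omega)
          have c3 : ms / 16 / 4 = ms / 64 := by omega
          simp only [pvLoopA, if_pos (by omega : ms > 0x3F), e1,
            if_pos (by omega : ms / 4 > 0x3F), e2, c2,
            if_pos (by omega : ms / 16 > 0x3F), e3, c3]
          norm_num [PySem.Int.floordiv_eq_ediv_of_pos, show (2:Int).toNat = 2 from rfl, show (3:Int).toNat = 3 from rfl, show (1:Int).toNat = 1 from rfl, show (0:Int).toNat = 0 from rfl]
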